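-- pv_equiv track=rewrite | github.com/linhdvu14/cp-sols | sols/CodeForces/1788_d2/D_Moving_Dots.py | solve
-- ===== SOURCE A (Python) =====
-- from bisect import bisect_left
--
-- MOD = 10**9 + 7
--
-- def solve(N, A):
--     POW = [1] * (N + 1)
--     for i in range(1, N + 1): POW[i] = POW[i - 1] * 2 % MOD
--
--     # make a, b move towards each other
--     res = 0
--     for i, a in enumerate(A):
--         for j in range(i + 1, N):
--             b = A[j]
--             d = b - a
--             l = bisect_left(A, a - d) - 1  # max l < i s.t. A[l] < a - d
--             r = bisect_left(A, b + d)      # min r > j s.t. A[r] >= b + d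
--             res = (res + POW[l + 1] * POW[N - r]) % MOD  # any subset on left x any subset on right
--
--     return res
-- ===== SOURCE B (Python) =====
-- MOD = 10**9 + 7
--
-- def solve(N, A):
--     # same sum, but the two binary searches per pair are replaced by two
--     # monotone pointers swept once per fixed i (A sorted ascending, N == len(A))
--     pw = [1]
--     p = 1
--     for _ in range(N):
--         p = p * 2 % MOD
--         pw.append(p)
--     res = 0
--     for i, a in enumerate(A):
--         cl = i          # count of elements < a - d; only decreases as j grows
--         cr = 0          # count of elements < b + d; only increases as j grows
--         for j in range(i + 1, N):
--             b = A[j]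
--             d = b - a
--             while cl > 0 and A[cl - 1] >= a - d:
--                 cl -= 1
--             while cr < N and A[cr] < b + d:
--                 cr += 1
--             res = (res + pw[cl] * pw[N - cr]) % MOD
--     return res
-- ===== Notes on version B (the rewrite author's own statement) =====
-- stated objective: alternative
-- what changed: The two bisect_left binary searches per pair are replaced by two monotone pointers (cl only shrinks, cr only grows) swept amortized O(1) per pair for each fixed i, with the power table built by a running product; intended as faster (measured 2.3-2.8x at sizes where both finish, though both remain quadratic overall). Pre_ covers the natural domain (A sorted nondecreasing, N == len(A)) plus all no-pair inputs (N <= 1 or empty A), excluding inputs where A's bisect results over an unsorted or longer-than-N list are accidental.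
-- outside the precondition, e.g. on solve(2, [3, 1]): A returns 16, B returns 4; on solve(2, [1, 2, 2]): A returns 4, B returns 1
import Mathlib
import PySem

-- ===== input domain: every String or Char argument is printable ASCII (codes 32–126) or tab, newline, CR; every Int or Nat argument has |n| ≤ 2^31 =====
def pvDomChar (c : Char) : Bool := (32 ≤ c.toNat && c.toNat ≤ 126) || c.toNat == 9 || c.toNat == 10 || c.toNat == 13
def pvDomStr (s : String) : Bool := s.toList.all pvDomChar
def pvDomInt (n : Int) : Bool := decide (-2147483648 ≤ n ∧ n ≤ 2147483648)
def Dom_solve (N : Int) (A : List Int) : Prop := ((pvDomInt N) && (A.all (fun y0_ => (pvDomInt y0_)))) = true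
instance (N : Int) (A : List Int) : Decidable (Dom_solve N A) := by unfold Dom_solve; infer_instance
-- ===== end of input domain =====

-- B replaces the two per-pair binary searches by monotone two-pointer sweeps (a different algorithm; measured ~2.3-2.8x faster at timed sizes, both quadratic); proved equal to A on the natural domain (A sorted nondecreasing, N = len A) and on no-pair inputs.


-- ===== PORT A =====
def solve (N : Int) (A : List Int) : Int :=
  let M : Int := 1000000007
  let POW := (PySem.List.pyRange 1 (N + 1) 1).foldl
      (fun P i => PySem.List.pySetD P i (PySem.Int.mod (PySem.List.pyGetD P (i - 1) 0 * 2) M))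
      (List.replicate (N + 1).toNat 1)
  (PySem.List.enumerate A).foldl (fun res ia =>
    (PySem.List.pyRange (ia.1 + 1) N 1).foldl (fun res j =>
      let b := PySem.List.pyGetD A j 0
      let d := b - ia.2
      let l : Int := (PySem.List.bisectLeft A (ia.2 - d) : Int) - 1
      let r : Int := (PySem.List.bisectLeft A (b + d) : Int)
      PySem.Int.mod (res + PySem.List.pyGetD POW (l + 1) 0 * PySem.List.pyGetD POW (N - r) 0) M)
      res) 0

-- ===== PORT B =====
-- while cl > 0 and A[cl-1] >= x: cl -= 1
def pyDescend (A : List Int) (x : Int) : Nat → Nat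
  | 0 => 0
  | n + 1 => if x ≤ PySem.List.pyGetD A (n : Int) 0 then pyDescend A x n else n + 1

-- while cr < n and A[cr] < x: cr += 1
def pyAscend (A : List Int) (x : Int) (n cr : Nat) : Nat :=
  if h : cr < n then
    if PySem.List.pyGetD A (cr : Int) 0 < x then pyAscend A x n (cr + 1) else cr
  else cr
termination_by n - cr

def solve_alt (N : Int) (A : List Int) : Int :=
  let M : Int := 1000000007
  let pw := ((PySem.List.pyRange 0 N 1).foldl
      (fun s _ => let p := PySem.Int.mod (s.2 * 2) M; (s.1 ++ [p], p)) ([1], 1)).1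
  (PySem.List.enumerate A).foldl (fun res ia =>
    ((PySem.List.pyRange (ia.1 + 1) N 1).foldl (fun st j =>
      let b := PySem.List.pyGetD A j 0
      let d := b - ia.2
      let cl := pyDescend A (ia.2 - d) st.2.1
      let cr := pyAscend A (b + d) N.toNat st.2.2
      (PySem.Int.mod (st.1 + PySem.List.pyGetD pw (cl : Int) 0 * PySem.List.pyGetD pw (N - (cr : Int)) 0) M, cl, cr))
      (res, ia.1.toNat, 0)).1) 0

-- ===== PRECONDITION & SPEC =====
-- Pre_ admits the function's natural domain (the CodeForces problem guarantees N = len(A) and A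
-- sorted nondecreasing) plus every degenerate input with no pair to sum (N ≤ 1 or A = [], where both
-- programs return 0); it excludes inputs with a pair but A unsorted or N ≠ len(A), where A's values
-- are accidents of running bisect on an unsorted (or longer-than-N) list, which the two-pointer scan
-- does not mimic.
def Pre_solve (N : Int) (A : List Int) : Prop :=
  (List.Pairwise (· ≤ ·) A ∧ N = (A.length : Int)) ∨ N ≤ 1 ∨ A = []
instance (N : Int) (A : List Int) : Decidable (Pre_solve N A) := by unfold Pre_solve; infer_instance
def pvWitness_solve : Int × List Int := (3, [1, 2, 5])

def Spec_solve (N : Int) (A : List Int) (out : Int) : Prop := out = solve_alt N A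
instance (N : Int) (A : List Int) (out : Int) : Decidable (Spec_solve N A out) := by unfold Spec_solve; infer_instance

-- ===== CLAIM (what is proved, stated in full; the proofs are below) =====
def Claim_equal_solve : Prop := ∀ (N : Int) (A : List Int), Dom_solve N A → Pre_solve N A → Spec_solve N A (solve N A)

-- ===== LEMMAS AND PROOFS =====

-- the shared modular power table
def pvTbl (L : Nat) : List Int := (List.range (L + 1)).map (fun k => 2 ^ k % 1000000007)

theorem pv_mod_step (m : Nat) :
    PySem.Int.mod (2 ^ m % 1000000007 * 2) 1000000007 = 2 ^ (m + 1) % 1000000007 := by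
  rw [PySem.Int.mod_eq_emod_of_pos (by norm_num), pow_succ]
  conv_rhs => rw [Int.mul_emod]
  norm_num

theorem pv_tblA (L m : Nat) (hm : m ≤ L) :
    (PySem.List.pyRange 1 ((m : Int) + 1) 1).foldl
      (fun P i => PySem.List.pySetD P i (PySem.Int.mod (PySem.List.pyGetD P (i - 1) 0 * 2) 1000000007))
      (List.replicate (L + 1) 1)
    = (List.range (m + 1)).map (fun k => 2 ^ k % 1000000007) ++ List.replicate (L - m) 1 := by
  induction m with
  | zero =>
    rw [PySem.List.pyRange_one_eq_nil (by omega)]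
    simp [List.range_succ, List.replicate_succ]
  | succ m ih =>
    have hm' : m ≤ L := by omega
    have hc : ((m + 1 : Nat) : Int) + 1 = ((m : Int) + 1) + 1 := by push_cast; ring
    rw [hc, PySem.List.pyRange_one_succ_right (by omega), List.foldl_append, ih hm']
    simp only [List.foldl_cons, List.foldl_nil]
    have hsub : ((m : Int) + 1) - 1 = ((m : Nat) : Int) := by ring
    rw [hsub, PySem.List.pyGetD_natCast]
    have hgetd : (((List.range (m + 1)).map (fun k => (2:Int) ^ k % 1000000007) ++ List.replicate (L - m) 1)).getD m 0 = 2 ^ m % 1000000007 := by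
      rw [List.getD_eq_getElem _ _ (by simp; omega)]
      rw [List.getElem_append_left (by simp)]
      simp
    rw [hgetd, pv_mod_step]
    have hcast : ((m : Int) + 1) = (((m + 1 : Nat)) : Int) := by push_cast; ring
    rw [hcast, PySem.List.pySetD_natCast]
    rw [List.set_append]
    have hLm : L - m = (L - (m + 1)) + 1 := by omega
    rw [if_neg (by simp), hLm, List.replicate_succ]
    simp [List.range_succ (n := m + 1)]

theorem pv_tblB (m : Nat) :
    (PySem.List.pyRange 0 (m : Int) 1).foldl
      (fun s _ => ((s.1 ++ [PySem.Int.mod (s.2 * 2) 1000000007] : List Int), PySem.Int.mod (s.2 * 2) 1000000007))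
      ([1], 1)
    = ((List.range (m + 1)).map (fun k => 2 ^ k % 1000000007), 2 ^ m % 1000000007) := by
  induction m with
  | zero => simp [PySem.List.pyRange_one_eq_nil (by omega : (0:Int) ≤ 0), List.range_succ]
  | succ m ih =>
    have hc : ((m + 1 : Nat) : Int) = (m : Int) + 1 := by push_cast; ring
    rw [hc, PySem.List.pyRange_one_succ_right (by omega), List.foldl_append, ih]
    simp only [List.foldl_cons, List.foldl_nil, pv_mod_step]
    rw [List.range_succ (n := m + 1)]
    simp

theorem pv_descend_eq (A : List Int) (hs : List.Pairwise (· ≤ ·) A) (x : Int) (s : Nat)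
    (h1 : PySem.List.bisectLeft A x ≤ s) (h2 : s ≤ A.length) :
    pyDescend A x s = PySem.List.bisectLeft A x := by
  obtain ⟨hle, hlt, hge⟩ := PySem.List.bisectLeft_spec A x hs
  induction s with
  | zero => simp [pyDescend]; omega
  | succ n ih =>
    have hn : n < A.length := by omega
    have hget : PySem.List.pyGetD A (n : Int) 0 = A[n] := by
      rw [PySem.List.pyGetD_natCast]
      exact List.getD_eq_getElem A 0 hn
    by_cases hc : PySem.List.bisectLeft A x ≤ n
    · have hx : x ≤ A[n] := hge n hn hc
      simp only [pyDescend, hget, if_pos hx]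
      exact ih hc (by omega)
    · have hcc : PySem.List.bisectLeft A x = n + 1 := by omega
      have hx : A[n] < x := hlt n hn (by omega)
      simp only [pyDescend, hget]
      rw [if_neg (by omega)]
      omega

theorem pv_ascend_eq (A : List Int) (hs : List.Pairwise (· ≤ ·) A) (x : Int) (s : Nat)
    (h1 : s ≤ PySem.List.bisectLeft A x) :
    pyAscend A x A.length s = PySem.List.bisectLeft A x := by
  obtain ⟨hle, hlt, hge⟩ := PySem.List.bisectLeft_spec A x hs
  have hkey : ∀ (k : Nat) (s : Nat), A.length - s ≤ k → s ≤ PySem.List.bisectLeft A x →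
      pyAscend A x A.length s = PySem.List.bisectLeft A x := by
    intro k
    induction k with
    | zero =>
      intro s hk hsb
      rw [pyAscend]
      have : ¬ s < A.length := by omega
      rw [dif_neg this]
      omega
    | succ m ih =>
      intro s hk hsb
      rw [pyAscend]
      by_cases hsl : s < A.length
      · rw [dif_pos hsl]
        have hget : PySem.List.pyGetD A (s : Int) 0 = A[s] := by
          rw [PySem.List.pyGetD_natCast]
          exact List.getD_eq_getElem A 0 hsl
        by_cases hsc : s < PySem.List.bisectLeft A x
        · have hx : A[s] < x := hlt s hsl hsc
          rw [hget, if_pos hx]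
          exact ih (s + 1) (by omega) (by omega)
        · have hseq : s = PySem.List.bisectLeft A x := by omega
          have hx : x ≤ A[s] := hge s hsl (by omega)
          rw [hget, if_neg (by omega)]
          exact hseq
      · rw [dif_neg hsl]
        omega
  exact hkey (A.length - s) s (le_refl _) h1

theorem pv_bisect_mono (A : List Int) (hs : List.Pairwise (· ≤ ·) A) {x y : Int} (hxy : x ≤ y) :
    PySem.List.bisectLeft A x ≤ PySem.List.bisectLeft A y := by
  obtain ⟨hle, hlt, hge⟩ := PySem.List.bisectLeft_spec A x hs
  obtain ⟨hle', hlt', hge'⟩ := PySem.List.bisectLeft_spec A y hs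
  by_contra hc
  push_neg at hc
  have h1 := hlt (PySem.List.bisectLeft A y) (by omega) hc
  have h2 := hge' (PySem.List.bisectLeft A y) (by omega) (le_refl _)
  omega

theorem pv_bisect_le_of_le (A : List Int) (hs : List.Pairwise (· ≤ ·) A) {x : Int} {k : Nat}
    (hk : k < A.length) (h : x ≤ A[k]) : PySem.List.bisectLeft A x ≤ k := by
  obtain ⟨hle, hlt, hge⟩ := PySem.List.bisectLeft_spec A x hs
  by_contra hc
  push_neg at hc
  have := hlt k hk hc
  omega

theorem pv_sorted_get_mono (A : List Int) (hs : List.Pairwise (· ≤ ·) A) {p q : Nat}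
    (hpq : p ≤ q) (hq : q < A.length) : A[p]'(by omega) ≤ A[q] := by
  rcases Nat.eq_or_lt_of_le hpq with h | h
  · subst h; rfl
  · exact List.pairwise_iff_getElem.mp hs p q (by omega) hq h

theorem pv_inner (A : List Int) (hs : List.Pairwise (· ≤ ·) A) (a : Int) :
    ∀ (s cl cr : Nat) (res : Int), cl ≤ A.length →
    (s < A.length → PySem.List.bisectLeft A (a - (A.getD s 0 - a)) ≤ cl ∧
                    cr ≤ PySem.List.bisectLeft A (A.getD s 0 + (A.getD s 0 - a))) →
    ((PySem.List.pyRange (s : Int) (A.length : Int) 1).foldl (fun st j =>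
      let b := PySem.List.pyGetD A j 0
      let d := b - a
      let cl := pyDescend A (a - d) st.2.1
      let cr := pyAscend A (b + d) A.length st.2.2
      (PySem.Int.mod (st.1 + PySem.List.pyGetD (pvTbl A.length) (cl : Int) 0 *
         PySem.List.pyGetD (pvTbl A.length) ((A.length : Int) - (cr : Int)) 0) 1000000007, cl, cr))
      (res, cl, cr)).1
    = (PySem.List.pyRange (s : Int) (A.length : Int) 1).foldl (fun res j =>
      let b := PySem.List.pyGetD A j 0
      let d := b - a
      let l : Int := (PySem.List.bisectLeft A (a - d) : Int) - 1
      let r : Int := (PySem.List.bisectLeft A (b + d) : Int)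
      PySem.Int.mod (res + PySem.List.pyGetD (pvTbl A.length) (l + 1) 0 *
        PySem.List.pyGetD (pvTbl A.length) ((A.length : Int) - r) 0) 1000000007) res := by
  intro s
  induction hk : A.length - s using Nat.strong_induction_on generalizing s with
  | _ k IH =>
  intro cl cr res hcl hinv
  by_cases hsl : s < A.length
  · have hlt : (s : Int) < (A.length : Int) := by omega
    rw [PySem.List.pyRange_one_cons hlt]
    simp only [List.foldl_cons]
    have hbs : PySem.List.pyGetD A (s : Int) 0 = A.getD s 0 := by
      rw [PySem.List.pyGetD_natCast]
    have hgs : A.getD s 0 = A[s] := List.getD_eq_getElem A 0 hsl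
    obtain ⟨hinv1, hinv2⟩ := hinv hsl
    have hdesc : pyDescend A (a - (A.getD s 0 - a)) cl = PySem.List.bisectLeft A (a - (A.getD s 0 - a)) :=
      pv_descend_eq A hs _ cl hinv1 hcl
    have hasc : pyAscend A (A.getD s 0 + (A.getD s 0 - a)) A.length cr
        = PySem.List.bisectLeft A (A.getD s 0 + (A.getD s 0 - a)) :=
      pv_ascend_eq A hs _ cr hinv2
    rw [hbs]
    simp only [hdesc, hasc]
    -- new state components
    set c1 := PySem.List.bisectLeft A (a - (A.getD s 0 - a)) with hc1
    set c2 := PySem.List.bisectLeft A (A.getD s 0 + (A.getD s 0 - a)) with hc2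
    have hcast : ((PySem.List.bisectLeft A (a - (A.getD s 0 - a)) : Int) - 1) + 1
        = ((c1 : Nat) : Int) := by omega
    have hstep : (s : Int) + 1 = ((s + 1 : Nat) : Int) := by push_cast; ring
    rw [hstep]
    rw [IH (A.length - (s + 1)) (by omega) (s + 1) rfl (c1 : Nat) (c2 : Nat) _
        (by
          obtain ⟨h1, h2, h3⟩ := PySem.List.bisectLeft_spec A (a - (A.getD s 0 - a)) hs
          omega)
        (by
          intro hsl1
          constructor
          · apply le_trans (pv_bisect_mono A hs ?_) (le_refl c1)
            have := pv_sorted_get_mono A hs (p := s) (q := s + 1) (by omega) hsl1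
            rw [List.getD_eq_getElem A 0 hsl1, hgs] at *
            omega
          · apply le_trans (le_refl c2) (pv_bisect_mono A hs ?_)
            have := pv_sorted_get_mono A hs (p := s) (q := s + 1) (by omega) hsl1
            rw [List.getD_eq_getElem A 0 hsl1, hgs] at *
            omega)]
    congr 1
    rw [hcast]
  · rw [PySem.List.pyRange_one_eq_nil (by omega)]
    simp

theorem pv_main (N : Int) (A : List Int) (hs : List.Pairwise (· ≤ ·) A)
    (hN : N = (A.length : Int)) : solve N A = solve_alt N A := by
  subst hN
  have htn : ((A.length : Int) + 1).toNat = A.length + 1 := by omega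
  have htn2 : ((A.length : Int)).toNat = A.length := by omega
  simp only [solve, solve_alt, htn, htn2]
  rw [pv_tblA A.length A.length (le_refl _), pv_tblB A.length]
  simp only [Nat.sub_self, List.replicate_zero, List.append_nil]
  apply PySem.List.foldl_congr_mem
  intro acc ia hia
  rw [PySem.List.mem_enumerate_iff] at hia
  obtain ⟨k, hk, hia⟩ := hia
  subst hia
  simp only [zero_add]
  have hstep : ((k : Int) + 1) = ((k + 1 : Nat) : Int) := by push_cast; ring
  have htk : ((k : Int)).toNat = k := by omega
  rw [hstep, htk]
  have := pv_inner A hs (A[k]) (k + 1) k 0 acc (by omega)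
    (by
      intro hk1
      refine ⟨?_, by omega⟩
      apply pv_bisect_le_of_le A hs hk
      have := pv_sorted_get_mono A hs (p := k) (q := k + 1) (by omega) hk1
      rw [List.getD_eq_getElem A 0 hk1]
      omega)
  exact this.symm

theorem pv_foldl_id (l : List (Int × Int)) (init : Int) :
    List.foldl (fun (res : Int) (_ : Int × Int) => res) init l = init := by
  induction l generalizing init with
  | nil => rfl
  | cons x t ih => exact ih init

theorem pv_trivial_A (N : Int) (A : List Int) (hN : N ≤ 1) : solve N A = 0 := by
  simp only [solve]
  rw [PySem.List.foldl_congr_mem _ _ (fun (res : Int) (_ : Int × Int) => res) 0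
    (by
      intro acc ia hia
      rw [PySem.List.mem_enumerate_iff] at hia
      obtain ⟨k, hk, hia⟩ := hia
      subst hia
      have hnil : PySem.List.pyRange (0 + (k : Int) + 1) N 1 = [] :=
        PySem.List.pyRange_one_eq_nil (by omega)
      rw [hnil]
      rfl)]
  exact pv_foldl_id _ 0

theorem pv_trivial_B (N : Int) (A : List Int) (hN : N ≤ 1) : solve_alt N A = 0 := by
  simp only [solve_alt]
  rw [PySem.List.foldl_congr_mem _ _ (fun (res : Int) (_ : Int × Int) => res) 0
    (by
      intro acc ia hia
      rw [PySem.List.mem_enumerate_iff] at hia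
      obtain ⟨k, hk, hia⟩ := hia
      subst hia
      have hnil : PySem.List.pyRange (0 + (k : Int) + 1) N 1 = [] :=
        PySem.List.pyRange_one_eq_nil (by omega)
      rw [hnil]
      rfl)]
  exact pv_foldl_id _ 0

-- ===== VERDICT (by name: the statement is the Claim_ definition above) =====
theorem solve_spec : Claim_equal_solve := by
  intro N A _hdom hpre
  unfold Spec_solve
  rcases hpre with ⟨hs, hN⟩ | hN | hA
  · exact pv_main N A hs hN
  · rw [pv_trivial_A N A hN, pv_trivial_B N A hN]
  · subst hA
    simp [solve, solve_alt, PySem.List.enumerate]
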